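-- pv_equiv track=rewrite | github.com/mroncarelli/pyxhydro | xraysim/specutils/tables.py | smallest_index_larger
-- ===== SOURCE A (Python) =====
-- def smallest_index_larger(array, value):
--     """
--     Returns the smallest index whose value is larger than the input value. Assumes the array is sorted in ascending
--     order.
--     :param array: array (sorted ascending) to search into
--     :param value: value: value to search
--     :return: index of the smallest value larger than the input value
--     """
--     idx = 0
--     while idx < len(array) - 1 and array[idx] <= value:
--         idx += 1
--
--     if array[idx] > value:
--         return idx
--     else:
--         return None
-- ===== SOURCE B (Python) =====
-- def smallest_index_larger(array, value):
--     """Single backward full pass with a best-so-far accumulator: walk the array from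
--     the last index down to 0 and record every index whose element exceeds value; the
--     last write (the smallest such index) wins. Returns None when none was recorded."""
--     i = len(array)
--     j = len(array) - 1
--     while j >= 0:
--         if array[j] > value:
--             i = j
--         j -= 1
--     return i if i < len(array) else None
-- ===== Notes on version B (the rewrite author's own statement) =====
-- stated objective: alternative
-- what changed: A's forward early-exit while-loop (advance while element <= value, then test the capped final index) is replaced by a single backward full pass that records every index whose element exceeds value into a best-so-far accumulator, so the leftmost hit is written last; no early exit and no final element test.
import Mathlib
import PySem

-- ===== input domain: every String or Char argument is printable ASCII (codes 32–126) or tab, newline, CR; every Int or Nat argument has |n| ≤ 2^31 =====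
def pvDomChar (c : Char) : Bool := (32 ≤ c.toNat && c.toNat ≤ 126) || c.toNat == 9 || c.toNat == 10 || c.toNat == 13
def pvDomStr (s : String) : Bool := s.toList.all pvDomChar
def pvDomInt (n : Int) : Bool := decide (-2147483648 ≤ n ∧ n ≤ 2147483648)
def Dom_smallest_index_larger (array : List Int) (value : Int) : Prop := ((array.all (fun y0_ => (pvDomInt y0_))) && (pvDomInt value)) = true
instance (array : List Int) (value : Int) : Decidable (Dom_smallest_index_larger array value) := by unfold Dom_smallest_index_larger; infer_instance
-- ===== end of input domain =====

-- B replaces A's forward early-exit scan (advance while element <= value, then test the capped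
-- final index) by a single backward full pass with a best-so-far accumulator — same O(n) cost,
-- a different traversal order and decomposition. Pre_ excludes only the empty list, on which A
-- raises IndexError (array[0] after the loop); B returns None there.


-- ===== PORT A =====
-- while idx < len(array) - 1 and array[idx] <= value: idx += 1
-- idx starts at 0 and only increments, so it is modelled as a Nat; inside the loop
-- idx < len - 1 guarantees the access array[idx] is in range, so getD is exact there.
def slLoopA (array : List Int) (value : Int) (idx : Nat) : Nat :=
  if idx < array.length - 1 ∧ array.getD idx 0 ≤ value then
    slLoopA array value (idx + 1)
  else idx
termination_by array.length - idx
decreasing_by omega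

def smallest_index_larger (array : List Int) (value : Int) : Option Int :=
  let idx := slLoopA array value 0
  -- final `array[idx]`: on the empty list Python raises IndexError (pyGet? = none; excluded by Pre_)
  match PySem.List.pyGet? array (idx : Int) with
  | some x => if x > value then some (idx : Int) else none
  | none => none

-- ===== PORT B =====
-- i = len(array); j = len(array) - 1; while j >= 0: (if array[j] > value: i = j); j -= 1
-- The countdown variable j runs len-1, …, 0, -1; it is modelled by the Nat fuel k = j + 1
-- (so k = 0 is the exit j = -1). Inside the loop j = k - 1 < len, so the access
-- array[j] is in range and getD is exact there.
def slBack (array : List Int) (value : Int) : Nat → Nat → Nat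
  | 0, i => i
  | (k + 1), i => slBack array value k (if array.getD k 0 > value then k else i)

def smallest_index_larger_alt (array : List Int) (value : Int) : Option Int :=
  let i := slBack array value array.length array.length
  if i < array.length then some (i : Int) else none

-- ===== PRECONDITION & SPEC =====
-- Pre_ excludes only the empty list, on which A raises IndexError (array[0] after the loop).
def Pre_smallest_index_larger (array : List Int) (value : Int) : Prop := array ≠ []
instance (array : List Int) (value : Int) : Decidable (Pre_smallest_index_larger array value) := by
  unfold Pre_smallest_index_larger; infer_instance

def pvWitness_smallest_index_larger : List Int × Int := ([3, 1, 4, 1], 2)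

def Spec_smallest_index_larger (array : List Int) (value : Int) (out : Option Int) : Prop :=
  out = smallest_index_larger_alt array value
instance (array : List Int) (value : Int) (out : Option Int) : Decidable (Spec_smallest_index_larger array value out) := by
  unfold Spec_smallest_index_larger; infer_instance

-- ===== CLAIM (what is proved, stated in full; the proofs are below) =====
def Claim_equal_smallest_index_larger : Prop := ∀ (array : List Int) (value : Int), Dom_smallest_index_larger array value → Pre_smallest_index_larger array value → Spec_smallest_index_larger array value (smallest_index_larger array value)

-- ===== LEMMAS AND PROOFS =====

-- the common characterisation of both ports: a first-match scan carrying the index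
def sliFirst (value : Int) : List Int → Nat → Option Int
  | [], _ => none
  | x :: xs, i => if x > value then some (i : Int) else sliFirst value xs (i + 1)

-- A's tail (look up the loop's final index, test it) agrees with the first-match scan.
theorem loop_eq_first (a : List Int) (v : Int) :
    ∀ idx : Nat, idx < a.length →
      (match PySem.List.pyGet? a ((slLoopA a v idx : Nat) : Int) with
        | some x => if x > v then some ((slLoopA a v idx : Nat) : Int) else none
        | none => none) = sliFirst v (a.drop idx) idx := by
  intro idx
  induction idx using slLoopA.induct a v with
  | case1 idx hcond ih =>
    intro hn
    have hdrop : a.drop idx = a[idx] :: a.drop (idx + 1) := List.drop_eq_getElem_cons hn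
    have hle : ¬ a[idx] > v := by
      have := hcond.2; rw [List.getD_eq_getElem a 0 hn] at this; omega
    rw [slLoopA, if_pos hcond, hdrop, sliFirst, if_neg hle]
    exact ih (by omega)
  | case2 idx hcond =>
    intro hn
    have hstop : slLoopA a v idx = idx := by rw [slLoopA, if_neg hcond]
    have hget : PySem.List.pyGet? a ((idx : Nat) : Int) = some a[idx] := by
      rw [PySem.List.pyGet?_natCast, List.getElem?_eq_getElem hn]
    have hdrop : a.drop idx = a[idx] :: a.drop (idx + 1) := List.drop_eq_getElem_cons hn
    rw [hstop, hget, hdrop, sliFirst]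
    rcases not_and_or.mp hcond with h1 | h2
    · have hlast : a.drop (idx + 1) = [] := List.drop_eq_nil_of_le (by omega)
      by_cases hx : a[idx] > v
      · simp [hx]
      · rw [hlast]; simp [hx, sliFirst]
    · have hx : a[idx] > v := by
        rw [List.getD_eq_getElem a 0 hn] at h2; omega
      simp [hx]

-- d below abbreviates a.findIdx (v < ·): everything before d is ≤ v and, in range, a[d] > v.
-- The first-match scan started at any k ≤ d lands exactly on d.
theorem scan_to_d (a : List Int) (v : Int) :
    ∀ n k, a.length - k ≤ n → k ≤ a.findIdx (fun x => decide (v < x)) →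
      sliFirst v (a.drop k) k =
        if a.findIdx (fun x => decide (v < x)) < a.length
        then some ((a.findIdx (fun x => decide (v < x)) : Nat) : Int) else none := by
  intro n
  induction n with
  | zero =>
    intro k hk hkd
    have hkl : a.length ≤ k := by omega
    have hdlen := List.findIdx_le_length (xs := a) (p := fun x => decide (v < x))
    rw [List.drop_eq_nil_of_le hkl, sliFirst, if_neg (by omega)]
  | succ n ih =>
    intro k hk hkd
    rcases Nat.lt_or_ge k a.length with hkl | hkl
    · rw [List.drop_eq_getElem_cons hkl, sliFirst]
      by_cases hx : a[k] > v
      · have hnk : ¬ k < a.findIdx (fun x => decide (v < x)) := by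
          intro hc
          have := List.not_of_lt_findIdx hc
          simp at this; omega
        have hk' : k = a.findIdx (fun x => decide (v < x)) := by omega
        rw [if_pos hx, hk', if_pos (hk' ▸ hkl)]
      · have hkd' : k < a.findIdx (fun x => decide (v < x)) := by
          rcases Nat.lt_or_ge k (a.findIdx (fun x => decide (v < x))) with hc | hc
          · exact hc
          · have hk' : k = a.findIdx (fun x => decide (v < x)) := by omega
            have := List.findIdx_getElem (xs := a) (p := fun x => decide (v < x)) (w := hk' ▸ hkl)
            simp at this
            exact absurd (hk' ▸ this) hx
        rw [if_neg hx]
        exact ih (k + 1) (by omega) hkd'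
    · have hdlen := List.findIdx_le_length (xs := a) (p := fun x => decide (v < x))
      have : a.findIdx (fun x => decide (v < x)) = a.length := by omega
      rw [List.drop_eq_nil_of_le hkl, sliFirst, if_neg (by omega)]

-- B's backward pass, run with fuel k ≤ len, returns d when d lies below k, else the accumulator.
theorem slBack_char (a : List Int) (v : Int) :
    ∀ k, k ≤ a.length → ∀ i : Nat,
      slBack a v k i = if a.findIdx (fun x => decide (v < x)) < k
        then a.findIdx (fun x => decide (v < x)) else i := by
  intro k
  induction k with
  | zero => intro _ i; rw [slBack, if_neg (by omega)]
  | succ k ih =>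
    intro hk i
    have hkl : k < a.length := by omega
    rw [slBack, ih (by omega), List.getD_eq_getElem a 0 hkl]
    by_cases hd : a.findIdx (fun x => decide (v < x)) < k
    · rw [if_pos hd, if_pos (by omega)]
    · rw [if_neg hd]
      by_cases hx : a[k] > v
      · have hnk : ¬ k < a.findIdx (fun x => decide (v < x)) := by
          intro hc
          have := List.not_of_lt_findIdx hc
          simp at this; omega
        have hk' : a.findIdx (fun x => decide (v < x)) = k := by omega
        rw [if_pos hx, if_pos (by omega), hk']
      · have hne : a.findIdx (fun x => decide (v < x)) ≠ k := by
          intro hk'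
          have := List.findIdx_getElem (xs := a) (p := fun x => decide (v < x)) (w := hk' ▸ hkl)
          simp at this
          exact absurd (hk' ▸ this) hx
        rw [if_neg hx, if_neg (by omega)]

-- ===== VERDICT =====
theorem smallest_index_larger_spec : Claim_equal_smallest_index_larger := by
  intro a v _ hne
  have hn : 0 < a.length := List.length_pos_iff.mpr hne
  have hdlen := List.findIdx_le_length (xs := a) (p := fun x => decide (v < x))
  unfold Spec_smallest_index_larger smallest_index_larger smallest_index_larger_alt
  have hA := loop_eq_first a v 0 hn
  simp only [List.drop_zero] at hA
  have hA' := scan_to_d a v a.length 0 (by omega) (Nat.zero_le _)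
  simp only [List.drop_zero] at hA'
  rw [hA, hA', slBack_char a v a.length le_rfl a.length]
  by_cases hd : a.findIdx (fun x => decide (v < x)) < a.length
  · rw [if_pos hd, if_pos hd, if_pos hd]
  · rw [if_neg hd, if_neg hd, if_neg (by omega)]
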